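-- pv_equiv track=rewrite | github.com/ChrisS2812/ComputingMaximumSuffixes | BruteForce.py | is_last_comp
-- ===== SOURCE A (Python) =====
-- M = 5
--
-- def is_leaf(index):
--     if M < 1:
--         return True
--
--     last_non_leaf_index = -1
--     for i in range(0, M):
--         last_non_leaf_index += 3 ** i
--     if index <= last_non_leaf_index:
--         return False
--     else:
--         return True
--
-- def is_last_comp(index):
--     if M < 1:
--         return False
--     if M == 2:
--         if index == 0:
--             return True
--         else:
--             return False
--
--     if is_leaf(index):
--         return False
--
--     last_non_last_comp_index = -1
--     for i in range(0, M - 1):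
--         last_non_last_comp_index += 3 ** i
--
--     if index > last_non_last_comp_index:
--         return True
--     else:
--         return False
-- ===== SOURCE B (Python) =====
-- M = 5
--
-- def is_last_comp(index):
--     if M < 1:
--         return False
--     if M == 2:
--         return index == 0
--     last_non_leaf = (3 ** M - 1) // 2 - 1
--     last_non_last_comp = (3 ** (M - 1) - 1) // 2 - 1
--     return last_non_last_comp < index <= last_non_leaf
-- ===== Notes on version B (the rewrite author's own statement) =====
-- stated objective: simpler
-- what changed: Replaces the helper call plus the two range-accumulation loops with closed-form geometric-series thresholds (3**M-1)//2-1 and (3**(M-1)-1)//2-1 and a single chained comparison.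
import Mathlib
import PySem

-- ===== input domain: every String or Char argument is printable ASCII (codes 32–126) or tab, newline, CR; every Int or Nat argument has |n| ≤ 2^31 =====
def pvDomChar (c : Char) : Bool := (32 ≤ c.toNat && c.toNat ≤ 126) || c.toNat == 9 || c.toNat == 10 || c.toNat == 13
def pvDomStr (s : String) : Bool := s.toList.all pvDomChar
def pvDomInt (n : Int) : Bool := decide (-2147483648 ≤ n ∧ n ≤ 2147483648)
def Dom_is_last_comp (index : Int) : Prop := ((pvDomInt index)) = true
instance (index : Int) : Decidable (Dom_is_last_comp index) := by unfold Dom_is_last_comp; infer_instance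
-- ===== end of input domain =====

-- B replaces A's is_leaf helper and two range-accumulation loops with closed-form
-- geometric-series thresholds and one chained comparison (objective: simpler).


-- ===== PORT A =====
-- module constant M = 5
def pyM : Int := 5

def is_leaf (index : Int) : Bool :=
  if pyM < 1 then true
  else
    let last_non_leaf_index : Int :=
      (PySem.List.pyRange 0 pyM 1).foldl (fun acc i => acc + (3:Int) ^ i.toNat) (-1)
    if index ≤ last_non_leaf_index then false else true

def is_last_comp (index : Int) : Bool :=
  if pyM < 1 then false
  else if pyM = 2 then
    (if index = 0 then true else false)
  else if is_leaf index then false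
  else
    let last_non_last_comp_index : Int :=
      (PySem.List.pyRange 0 (pyM - 1) 1).foldl (fun acc i => acc + (3:Int) ^ i.toNat) (-1)
    if index > last_non_last_comp_index then true else false

-- ===== PORT B =====
def is_last_comp_alt (index : Int) : Bool :=
  if pyM < 1 then false
  else if pyM = 2 then decide (index = 0)
  else
    let last_non_leaf : Int := PySem.Int.floordiv ((3:Int) ^ pyM.toNat - 1) 2 - 1
    let last_non_last_comp : Int := PySem.Int.floordiv ((3:Int) ^ (pyM - 1).toNat - 1) 2 - 1
    decide (last_non_last_comp < index ∧ index ≤ last_non_leaf)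

-- ===== PRECONDITION & SPEC =====
def Spec_is_last_comp (index : Int) (out : Bool) : Prop := out = is_last_comp_alt index
instance (index : Int) (out : Bool) : Decidable (Spec_is_last_comp index out) := by unfold Spec_is_last_comp; infer_instance

-- ===== CLAIM (what is proved, stated in full; the proofs are below) =====
def Claim_equal_is_last_comp : Prop := ∀ (index : Int), Dom_is_last_comp index → Spec_is_last_comp index (is_last_comp index)

-- ===== LEMMAS AND PROOFS =====

-- ===== VERDICT (by name: the statement is the Claim_ definition above) =====
theorem is_last_comp_spec : Claim_equal_is_last_comp := by
  intro index _
  have h5 : PySem.List.pyRange 0 5 1 = [0, 1, 2, 3, 4] := by decide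
  have h4 : PySem.List.pyRange 0 (5 - 1) 1 = [0, 1, 2, 3] := by decide
  unfold Spec_is_last_comp is_last_comp is_last_comp_alt is_leaf pyM
  rw [h5, h4]
  have hf1 : Int.fdiv 80 2 = 40 := by decide
  have hf2 : Int.fdiv 242 2 = 121 := by decide
  norm_num [List.foldl, PySem.Int.floordiv, Int.toNat]
  rw [hf1, hf2, Bool.eq_iff_iff]
  simp only [Bool.and_eq_true, Bool.not_eq_eq_eq_not, Bool.not_true, decide_eq_true_eq,
    decide_eq_false_iff_not]
  omega
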